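-- pv_equiv track=rewrite | github.com/Good-Hill-Farms/fulfillment | utils/rule_engine.py | apply_rules_to_order
-- ===== SOURCE A (Python) =====
-- from typing import Any, Dict, List
--
-- def apply_rules_to_order(
--     order: Dict[str, Any], rules: List[Dict[str, str]], bundles: Dict[str, List[str]]
-- ) -> Dict[str, Any]:
--     """
--     Apply rules to a single order
--
--     Args:
--         order: Order dictionary
--         rules: List of rule dictionaries
--         bundles: Dictionary of bundles
--
--     Returns:
--         Dict[str, Any]: Updated order with rules applied
--     """
--     updated_order = order.copy()
--
--     # Apply zip code rules
--     if not updated_order.get("Fulfillment Center"):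
--         zip_code = str(updated_order.get("Shipping: Zip", ""))
--
--         for rule in rules:
--             if rule["type"] == "zip":
--                 condition = rule["condition"]
--
--                 # Check if zip code matches rule condition
--                 if condition.startswith("starts with"):
--                     prefix = condition.split("starts with ")[1].strip()
--                     if zip_code.startswith(prefix):
--                         # Extract warehouse from action
--                         action_parts = rule["action"].split("=")
--                         if len(action_parts) == 2 and action_parts[0].strip() == "warehouse":
--                             updated_order["Fulfillment Center"] = action_parts[1].strip()
--                             break
--
--     # Apply bundle rules
--     sku = updated_order.get("SKU Helper", "").replace("f.", "")
--
--     for rule in rules: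
--         if rule["type"] == "bundle":
--             condition = rule["condition"]
--
--             # Check if SKU is mentioned in condition
--             if sku in condition or any(fruit in sku for fruit in condition.split(",")):
--                 # Extract bundle from action
--                 action_parts = rule["action"].split("=")
--                 if len(action_parts) == 2 and action_parts[0].strip() == "bundle":
--                     bundle_name = action_parts[1].strip()
--                     updated_order["Bundle"] = bundle_name
--                     break
--
--     # Apply priority rules
--     for rule in rules:
--         if rule["type"] == "priority":
--             condition = rule["condition"]
--             tags = updated_order.get("NEW Tags", "")
--
--             # Check if tags match condition
--             if condition in tags:
--                 # Extract priority from action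
--                 action_parts = rule["action"].split("=")
--                 if len(action_parts) == 2 and action_parts[0].strip() == "priority":
--                     updated_order["Priority"] = action_parts[1].strip()
--                     break
--
--     return updated_order
-- ===== SOURCE B (Python) =====
-- def apply_rules_to_order(order, rules, bundles):
--     # Single pass over the rules: decide the three actions first, then build the
--     # updated order with the assignments applied in A's fixed order.
--     do_zip = not order.get("Fulfillment Center")
--     zip_code = str(order.get("Shipping: Zip", ""))
--     sku = order.get("SKU Helper", "").replace("f.", "")
--     tags = order.get("NEW Tags", "")
--
--     fc = bundle = priority = None
--     for rule in rules:
--         t = rule["type"]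
--         if t == "zip" and do_zip and fc is None:
--             condition = rule["condition"]
--             if condition.startswith("starts with"):
--                 prefix = condition.split("starts with ")[1].strip()
--                 if zip_code.startswith(prefix):
--                     parts = rule["action"].split("=")
--                     if len(parts) == 2 and parts[0].strip() == "warehouse":
--                         fc = parts[1].strip()
--         elif t == "bundle" and bundle is None:
--             condition = rule["condition"]
--             if sku in condition or any(f in sku for f in condition.split(",")):
--                 parts = rule["action"].split("=")
--                 if len(parts) == 2 and parts[0].strip() == "bundle":
--                     bundle = parts[1].strip()
--         elif t == "priority" and priority is None:
--             condition = rule["condition"]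
--             if condition in tags:
--                 parts = rule["action"].split("=")
--                 if len(parts) == 2 and parts[0].strip() == "priority":
--                     priority = parts[1].strip()
--
--     updated = order.copy()
--     if fc is not None:
--         updated["Fulfillment Center"] = fc
--     if bundle is not None:
--         updated["Bundle"] = bundle
--     if priority is not None:
--         updated["Priority"] = priority
--     return updated
-- ===== Notes on version B (the rewrite author's own statement) =====
-- stated objective: alternative
-- what changed: B replaces A's three sequential scans of rules (each mutating the order dict and breaking) with one pure pass that dispatches on rule['type'] under three 'not yet decided' flags, collecting the three action values first and then building the updated order with the assignments applied at the end.
import Mathlib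
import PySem

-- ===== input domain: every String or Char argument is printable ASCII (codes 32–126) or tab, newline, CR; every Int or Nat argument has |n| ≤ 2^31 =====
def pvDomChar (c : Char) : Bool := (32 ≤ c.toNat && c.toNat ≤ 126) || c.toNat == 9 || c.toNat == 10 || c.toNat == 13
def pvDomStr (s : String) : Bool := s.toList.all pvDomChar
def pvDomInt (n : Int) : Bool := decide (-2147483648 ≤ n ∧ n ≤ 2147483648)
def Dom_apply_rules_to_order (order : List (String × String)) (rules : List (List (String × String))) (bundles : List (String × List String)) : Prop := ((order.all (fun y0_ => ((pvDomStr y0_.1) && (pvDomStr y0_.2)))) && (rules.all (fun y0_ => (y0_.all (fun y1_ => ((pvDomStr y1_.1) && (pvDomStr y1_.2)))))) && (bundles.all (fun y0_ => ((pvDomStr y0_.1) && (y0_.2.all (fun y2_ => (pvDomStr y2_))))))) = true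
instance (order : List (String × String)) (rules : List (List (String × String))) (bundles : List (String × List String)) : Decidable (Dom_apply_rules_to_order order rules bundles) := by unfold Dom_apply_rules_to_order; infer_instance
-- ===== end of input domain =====

-- B replaces A's three sequential rule scans (each mutating the order dict and breaking)
-- by one pure pass that dispatches on the rule type under three "not yet decided" flags and
-- applies the collected assignments at the end; objective: alternative decomposition.

-- ===== PORT A =====
-- s.split(sep) for a non-empty literal sep (exact there: Str.split? is none only for sep = "")
def pySplit (s sep : String) : List String := (PySem.Str.split? s sep).getD []

-- A's three loops; each rule-dict key access rule["…"] is ported as getD "…" ""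
-- (the KeyError inputs are excluded by Pre_, as is the IndexError of split("starts with ")[1]).
def aZipLoop (d : PySem.Dict String String) (zip_code : String) (rules : List (List (String × String))) : PySem.Dict String String :=
  match rules with
  | [] => d
  | r :: rs =>
    let rd := PySem.Dict.ofList r
    if rd.getD "type" "" == "zip" then
      let condition := rd.getD "condition" ""
      if PySem.Str.startswith condition "starts with" then
        let pfx := PySem.Str.strip (PySem.List.pyGetD (pySplit condition "starts with ") 1 "")
        if PySem.Str.startswith zip_code pfx then
          let action_parts := pySplit (rd.getD "action" "") "="
          if action_parts.length == 2 && (PySem.Str.strip (PySem.List.pyGetD action_parts 0 "") == "warehouse") then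
            d.insert "Fulfillment Center" (PySem.Str.strip (PySem.List.pyGetD action_parts 1 ""))
          else aZipLoop d zip_code rs
        else aZipLoop d zip_code rs
      else aZipLoop d zip_code rs
    else aZipLoop d zip_code rs

def aBundleLoop (d : PySem.Dict String String) (sku : String) (rules : List (List (String × String))) : PySem.Dict String String :=
  match rules with
  | [] => d
  | r :: rs =>
    let rd := PySem.Dict.ofList r
    if rd.getD "type" "" == "bundle" then
      let condition := rd.getD "condition" ""
      if PySem.Str.isIn sku condition || (pySplit condition ",").any (fun fruit => PySem.Str.isIn fruit sku) then
        let action_parts := pySplit (rd.getD "action" "") "="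
        if action_parts.length == 2 && (PySem.Str.strip (PySem.List.pyGetD action_parts 0 "") == "bundle") then
          d.insert "Bundle" (PySem.Str.strip (PySem.List.pyGetD action_parts 1 ""))
        else aBundleLoop d sku rs
      else aBundleLoop d sku rs
    else aBundleLoop d sku rs

def aPrioLoop (d : PySem.Dict String String) (rules : List (List (String × String))) : PySem.Dict String String :=
  match rules with
  | [] => d
  | r :: rs =>
    let rd := PySem.Dict.ofList r
    if rd.getD "type" "" == "priority" then
      let condition := rd.getD "condition" ""
      let tags := d.getD "NEW Tags" ""
      if PySem.Str.isIn condition tags then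
        let action_parts := pySplit (rd.getD "action" "") "="
        if action_parts.length == 2 && (PySem.Str.strip (PySem.List.pyGetD action_parts 0 "") == "priority") then
          d.insert "Priority" (PySem.Str.strip (PySem.List.pyGetD action_parts 1 ""))
        else aPrioLoop d rs
      else aPrioLoop d rs
    else aPrioLoop d rs

def apply_rules_to_order (order : List (String × String)) (rules : List (List (String × String))) (bundles : List (String × List String)) : List (String × String) :=
  let d0 := PySem.Dict.ofList order
  -- not updated_order.get("Fulfillment Center"): missing (None) or "" are falsy (values are strings)
  let d1 := if d0.getD "Fulfillment Center" "" == "" then aZipLoop d0 (d0.getD "Shipping: Zip" "") rules else d0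
  let sku := PySem.Str.replace (d1.getD "SKU Helper" "") "f." ""
  let d2 := aBundleLoop d1 sku rules
  let d3 := aPrioLoop d2 rules
  d3.items

-- ===== PORT B =====
-- B's per-rule deciders: some v  =  the action value assigned on this rule, none = keep scanning.
def bZipTry (rd : PySem.Dict String String) (zip_code : String) : Option String :=
  let condition := rd.getD "condition" ""
  if PySem.Str.startswith condition "starts with" then
    let pfx := PySem.Str.strip (PySem.List.pyGetD (pySplit condition "starts with ") 1 "")
    if PySem.Str.startswith zip_code pfx then
      let parts := pySplit (rd.getD "action" "") "="
      if parts.length == 2 && (PySem.Str.strip (PySem.List.pyGetD parts 0 "") == "warehouse") then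
        some (PySem.Str.strip (PySem.List.pyGetD parts 1 ""))
      else none
    else none
  else none

def bBundleTry (rd : PySem.Dict String String) (sku : String) : Option String :=
  let condition := rd.getD "condition" ""
  if PySem.Str.isIn sku condition || (pySplit condition ",").any (fun fruit => PySem.Str.isIn fruit sku) then
    let parts := pySplit (rd.getD "action" "") "="
    if parts.length == 2 && (PySem.Str.strip (PySem.List.pyGetD parts 0 "") == "bundle") then
      some (PySem.Str.strip (PySem.List.pyGetD parts 1 ""))
    else none
  else none

def bPrioTry (rd : PySem.Dict String String) (tags : String) : Option String :=
  let condition := rd.getD "condition" ""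
  if PySem.Str.isIn condition tags then
    let parts := pySplit (rd.getD "action" "") "="
    if parts.length == 2 && (PySem.Str.strip (PySem.List.pyGetD parts 0 "") == "priority") then
      some (PySem.Str.strip (PySem.List.pyGetD parts 1 ""))
    else none
  else none

-- B's single pass: one loop over rules with three accumulators (None = not yet decided).
def bScan (do_zip : Bool) (zip_code sku tags : String) (rules : List (List (String × String)))
    (fc bdl pri : Option String) : Option String × Option String × Option String :=
  match rules with
  | [] => (fc, bdl, pri)
  | r :: rs =>
    let rd := PySem.Dict.ofList r
    let t := rd.getD "type" ""
    if t == "zip" && do_zip && fc.isNone then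
      bScan do_zip zip_code sku tags rs (bZipTry rd zip_code) bdl pri
    else if t == "bundle" && bdl.isNone then
      bScan do_zip zip_code sku tags rs fc (bBundleTry rd sku) pri
    else if t == "priority" && pri.isNone then
      bScan do_zip zip_code sku tags rs fc bdl (bPrioTry rd tags)
    else
      bScan do_zip zip_code sku tags rs fc bdl pri

def apply_rules_to_order_alt (order : List (String × String)) (rules : List (List (String × String))) (bundles : List (String × List String)) : List (String × String) :=
  let d0 := PySem.Dict.ofList order
  let do_zip := d0.getD "Fulfillment Center" "" == ""
  let zip_code := d0.getD "Shipping: Zip" ""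
  let sku := PySem.Str.replace (d0.getD "SKU Helper" "") "f." ""
  let tags := d0.getD "NEW Tags" ""
  let res := bScan do_zip zip_code sku tags rules none none none
  let u1 := match res.1 with | some v => d0.insert "Fulfillment Center" v | none => d0
  let u2 := match res.2.1 with | some v => u1.insert "Bundle" v | none => u1
  let u3 := match res.2.2 with | some v => u2.insert "Priority" v | none => u2
  u3.items

-- ===== PRECONDITION & SPEC =====
-- Pre_ excludes exactly the inputs on which Python A raises: a rule without "type" (KeyError),
-- a zip/bundle/priority rule without "condition" or "action" (KeyError reachable depending on matching),
-- and a zip condition starting with "starts with" but not "starts with " (IndexError in split(...)[1]).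
-- This is mildly wider than the exact raise set (a missing "condition"/"action" behind a break or a
-- non-matching condition never gets read), because the exact set would re-simulate the scan.
def Pre_apply_rules_to_order (order : List (String × String)) (rules : List (List (String × String))) (bundles : List (String × List String)) : Prop :=
  ∀ r ∈ rules,
    (PySem.Dict.ofList r : PySem.Dict String String).contains "type" = true ∧
    (((PySem.Dict.ofList r : PySem.Dict String String).getD "type" "" = "zip" ∨
      (PySem.Dict.ofList r : PySem.Dict String String).getD "type" "" = "bundle" ∨
      (PySem.Dict.ofList r : PySem.Dict String String).getD "type" "" = "priority") →
      (PySem.Dict.ofList r : PySem.Dict String String).contains "condition" = true ∧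
      (PySem.Dict.ofList r : PySem.Dict String String).contains "action" = true) ∧
    ((PySem.Dict.ofList r : PySem.Dict String String).getD "type" "" = "zip" →
      PySem.Str.startswith ((PySem.Dict.ofList r : PySem.Dict String String).getD "condition" "") "starts with" = true →
      PySem.Str.startswith ((PySem.Dict.ofList r : PySem.Dict String String).getD "condition" "") "starts with " = true)

instance (order : List (String × String)) (rules : List (List (String × String))) (bundles : List (String × List String)) : Decidable (Pre_apply_rules_to_order order rules bundles) := by unfold Pre_apply_rules_to_order; infer_instance

def pvWitness_apply_rules_to_order : (List (String × String)) × (List (List (String × String))) × (List (String × List String)) :=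
  ([("Shipping: Zip", "94103"), ("SKU Helper", "f.apple"), ("NEW Tags", "hot")],
   [[("type", "zip"), ("condition", "starts with 94"), ("action", "warehouse = Oxnard")],
    [("type", "bundle"), ("condition", "apple,pear"), ("action", "bundle = FruitBox")]],
   [])

def Spec_apply_rules_to_order (order : List (String × String)) (rules : List (List (String × String))) (bundles : List (String × List String)) (out : List (String × String)) : Prop := out = apply_rules_to_order_alt order rules bundles
instance (order : List (String × String)) (rules : List (List (String × String))) (bundles : List (String × List String)) (out : List (String × String)) : Decidable (Spec_apply_rules_to_order order rules bundles out) := by unfold Spec_apply_rules_to_order; infer_instance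

-- ===== CLAIM (what is proved, stated in full; the proofs are below) =====
def Claim_equal_apply_rules_to_order : Prop := ∀ (order : List (String × String)) (rules : List (List (String × String))) (bundles : List (String × List String)), Dom_apply_rules_to_order order rules bundles → Pre_apply_rules_to_order order rules bundles → Spec_apply_rules_to_order order rules bundles (apply_rules_to_order order rules bundles)

-- ===== LEMMAS AND PROOFS =====

-- first-match scans, one per category (proof-side characterisation of both sides)
def zscan (z : String) : List (List (String × String)) → Option String
  | [] => none
  | r :: rs =>
    let rd := PySem.Dict.ofList r
    if rd.getD "type" "" == "zip" then
      match bZipTry rd z with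
      | some v => some v
      | none => zscan z rs
    else zscan z rs

def bscanS (sku : String) : List (List (String × String)) → Option String
  | [] => none
  | r :: rs =>
    let rd := PySem.Dict.ofList r
    if rd.getD "type" "" == "bundle" then
      match bBundleTry rd sku with
      | some v => some v
      | none => bscanS sku rs
    else bscanS sku rs

def pscan (tags : String) : List (List (String × String)) → Option String
  | [] => none
  | r :: rs =>
    let rd := PySem.Dict.ofList r
    if rd.getD "type" "" == "priority" then
      match bPrioTry rd tags with
      | some v => some v
      | none => pscan tags rs
    else pscan tags rs

theorem aZipLoop_eq (d : PySem.Dict String String) (z : String) (rules : List (List (String × String))) :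
    aZipLoop d z rules = match zscan z rules with
      | some v => d.insert "Fulfillment Center" v
      | none => d := by
  induction rules with
  | nil => rfl
  | cons r rs ih =>
    simp only [aZipLoop, zscan, bZipTry]
    split_ifs <;> simp [ih]

theorem aBundleLoop_eq (d : PySem.Dict String String) (sku : String) (rules : List (List (String × String))) :
    aBundleLoop d sku rules = match bscanS sku rules with
      | some v => d.insert "Bundle" v
      | none => d := by
  induction rules with
  | nil => rfl
  | cons r rs ih =>
    simp only [aBundleLoop, bscanS, bBundleTry]
    split_ifs <;> simp [ih]

theorem aPrioLoop_eq (d : PySem.Dict String String) (rules : List (List (String × String))) :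
    aPrioLoop d rules = match pscan (d.getD "NEW Tags" "") rules with
      | some v => d.insert "Priority" v
      | none => d := by
  induction rules with
  | nil => rfl
  | cons r rs ih =>
    simp only [aPrioLoop, pscan, bPrioTry]
    split_ifs <;> simp [ih]

theorem bScan_eq (dz : Bool) (z s tg : String) (rules : List (List (String × String)))
    (fc bdl pri : Option String) :
    bScan dz z s tg rules fc bdl pri =
      ((if dz then fc.or (zscan z rules) else fc),
       bdl.or (bscanS s rules),
       pri.or (pscan tg rules)) := by
  induction rules generalizing fc bdl pri with
  | nil => cases fc <;> cases bdl <;> cases pri <;> cases dz <;> rfl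
  | cons r rs ih =>
    simp only [bScan, zscan, bscanS, pscan]
    by_cases h1 : (PySem.Dict.ofList r : PySem.Dict String String).getD "type" "" = "zip" <;>
    by_cases h2 : (PySem.Dict.ofList r : PySem.Dict String String).getD "type" "" = "bundle" <;>
    by_cases h3 : (PySem.Dict.ofList r : PySem.Dict String String).getD "type" "" = "priority" <;>
    cases dz <;> cases fc <;> cases bdl <;> cases pri <;>
      first
        | (simp_all [ih]; done)
        | (simp_all;
            first
              | (cases bZipTry (PySem.Dict.ofList r) z <;> simp)
              | (cases bBundleTry (PySem.Dict.ofList r) s <;> simp)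
              | (cases bPrioTry (PySem.Dict.ofList r) tg <;> simp))

theorem apply_rules_to_order_eq_alt (order : List (String × String)) (rules : List (List (String × String))) (bundles : List (String × List String)) :
    apply_rules_to_order order rules bundles = apply_rules_to_order_alt order rules bundles := by
  simp only [apply_rules_to_order, apply_rules_to_order_alt,
    aZipLoop_eq, aBundleLoop_eq, aPrioLoop_eq, bScan_eq, Option.none_or]
  set d0 := (PySem.Dict.ofList order : PySem.Dict String String) with hd0
  by_cases hdz : d0.getD "Fulfillment Center" "" = ""
  · simp only [hdz, beq_self_eq_true, if_true]
    cases zscan (d0.getD "Shipping: Zip" "") rules <;>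
      simp only [PySem.Dict.getD_insert] <;> (try simp) <;>
      cases bscanS (PySem.Str.replace (d0.getD "SKU Helper" "") "f." "") rules <;>
        simp [PySem.Dict.getD_insert]
  · simp only [beq_iff_eq, if_neg hdz]
    cases bscanS (PySem.Str.replace (d0.getD "SKU Helper" "") "f." "") rules <;>
      simp [PySem.Dict.getD_insert]

-- ===== VERDICT (by name: the statement is the Claim_ definition above) =====
theorem apply_rules_to_order_spec : Claim_equal_apply_rules_to_order := by
  intro order rules bundles _ _
  unfold Spec_apply_rules_to_order
  exact apply_rules_to_order_eq_alt order rules bundles
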